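-- pv_equiv track=rewrite | github.com/wanderxuhq/ai-video-summary | vtt_parser.py | parse_vtt_to_custom_format
-- ===== SOURCE A (Python) =====
-- def parse_vtt_to_custom_format(vtt_content):
--     """
--     Parses VTT content and converts it to a custom format.
--
--     The new format is:
--     0
--     Subtitle content
--     Potentially multi-line subtitle content
--
--     1
--     Another subtitle content
--     Another potentially multi-line subtitle content
--     """
--     lines = vtt_content.strip().split('\n')
--
--     # Filter out WEBVTT header, timestamps, and empty lines
--     subtitle_lines = []
--     is_subtitle = False
--     for line in lines:
--         if "-->" in line:
--             is_subtitle = True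
--             continue
--         if line.strip() == "" or line.strip().isdigit() or "WEBVTT" in line:
--             is_subtitle = False
--             continue
--         if is_subtitle:
--             subtitle_lines.append(line.strip())
--
--     # Group subtitles that might have been on separate lines but belong to the same timestamp
--     cues = []
--     current_cue = ""
--     lines = vtt_content.strip().split('\n')
--     temp_cue = []
--
--     for line in lines:
--         line = line.strip()
--         if "-->" in line:
--             if temp_cue:
--                 cues.append("\n".join(temp_cue))
--                 temp_cue = []
--         elif line and not line.isdigit() and "WEBVTT" not in line:
--             temp_cue.append(line)
--     if temp_cue:
--         cues.append("\n".join(temp_cue))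
--
--     # Format the cues into the desired output format
--     formatted_output = []
--     for i, cue in enumerate(cues):
--         formatted_output.append(str(i))
--         formatted_output.append(cue)
--         formatted_output.append("")  # Add a blank line for separation
--
--     return "\n".join(formatted_output)
-- ===== SOURCE B (Python) =====
-- def parse_vtt_to_custom_format(vtt_content):
--     # Split into blocks at the '-->' timestamp lines, then clean each block.
--     lines = [l.strip() for l in vtt_content.strip().split('\n')]
--     idx = [-1] + [i for i, l in enumerate(lines) if '-->' in l] + [len(lines)]
--     blocks = [lines[a + 1:b] for a, b in zip(idx, idx[1:])]
--     cues = ["\n".join(l for l in blk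
--                       if l and not l.isdigit() and 'WEBVTT' not in l)
--             for blk in blocks]
--     return "\n".join("\n".join((str(i), c, ""))
--                      for i, c in enumerate([c for c in cues if c]))
-- ===== Notes on version B (the rewrite author's own statement) =====
-- stated objective: alternative
-- what changed: A's accumulate-and-flush single pass (with a dead first loop) is replaced by a split-into-blocks decomposition: compute the positions of the timestamp marker lines, slice the stripped lines into blocks between consecutive markers, clean and join each block, drop empty cues, then number them.
import Mathlib
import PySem

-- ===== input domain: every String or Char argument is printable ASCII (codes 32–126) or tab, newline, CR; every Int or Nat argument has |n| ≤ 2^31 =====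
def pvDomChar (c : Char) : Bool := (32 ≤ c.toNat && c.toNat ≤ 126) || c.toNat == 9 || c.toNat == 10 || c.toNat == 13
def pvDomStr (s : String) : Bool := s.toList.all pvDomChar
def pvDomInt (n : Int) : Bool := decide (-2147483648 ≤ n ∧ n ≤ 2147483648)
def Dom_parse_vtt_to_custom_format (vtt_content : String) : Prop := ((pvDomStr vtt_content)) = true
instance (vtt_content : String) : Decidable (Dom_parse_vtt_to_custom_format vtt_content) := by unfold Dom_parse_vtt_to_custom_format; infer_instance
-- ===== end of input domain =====

-- B re-implements A's accumulate-and-flush single pass as a split-into-blocks decomposition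
-- (timestamp-marker positions → slices → per-block cleanup); objective: alternative decomposition, same cost.

-- ===== PORT A =====
-- body of A's first loop (its result `subtitle_lines` is never used by A; kept for faithfulness)
def pvStepA1 (st : List String × Bool) (line : String) : List String × Bool :=
  if PySem.Str.isIn "-->" line then (st.1, true)
  else if PySem.Str.strip line = "" ∨ PySem.Str.strIsdigit (PySem.Str.strip line) = true
          ∨ PySem.Str.isIn "WEBVTT" line = true then (st.1, false)
  else if st.2 then (st.1 ++ [PySem.Str.strip line], st.2) else st

-- body of A's second loop: accumulate temp_cue (st.2), flush into cues (st.1) at '-->' lines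
def pvStepA2 (st : List String × List String) (line0 : String) : List String × List String :=
  let line := PySem.Str.strip line0
  if PySem.Str.isIn "-->" line then
    (if st.2 ≠ [] then (st.1 ++ [PySem.Str.join "\n" st.2], ([] : List String)) else st)
  else if line ≠ "" ∧ ¬ PySem.Str.strIsdigit line = true ∧ ¬ PySem.Str.isIn "WEBVTT" line = true then
    (st.1, st.2 ++ [line])
  else st

def parse_vtt_to_custom_format (vtt_content : String) : String :=
  let lines := (PySem.Str.split? (PySem.Str.strip vtt_content) "\n").getD []
  let _subtitle_lines := (lines.foldl pvStepA1 ([], false)).1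
  let st := lines.foldl pvStepA2 ([], [])
  let cues := if st.2 ≠ [] then st.1 ++ [PySem.Str.join "\n" st.2] else st.1
  let formatted_output := (PySem.List.enumerate cues).foldl
      (fun acc p => acc ++ [PySem.Int.toStr p.1, p.2, ""]) []
  PySem.Str.join "\n" formatted_output

-- ===== PORT B =====
def parse_vtt_to_custom_format_alt (vtt_content : String) : String :=
  let lines := (((PySem.Str.split? (PySem.Str.strip vtt_content) "\n").getD []).map PySem.Str.strip)
  let idx : List Int :=
    [-1] ++ ((PySem.List.enumerate lines).filter (fun p => PySem.Str.isIn "-->" p.2)).map (·.1)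
         ++ [(lines.length : Int)]
  let blocks := (idx.zip idx.tail).map (fun p => PySem.List.slice lines (some (p.1 + 1)) (some p.2))
  let cues := blocks.map (fun blk =>
      PySem.Str.join "\n" (blk.filter (fun l =>
        decide (l ≠ "") && !PySem.Str.strIsdigit l && !PySem.Str.isIn "WEBVTT" l)))
  PySem.Str.join "\n" ((PySem.List.enumerate (cues.filter (fun c => decide (c ≠ "")))).map
      (fun p => PySem.Str.join "\n" [PySem.Int.toStr p.1, p.2, ""]))

-- ===== PRECONDITION & SPEC =====
def Spec_parse_vtt_to_custom_format (vtt_content : String) (out : String) : Prop := out = parse_vtt_to_custom_format_alt vtt_content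
instance (vtt_content : String) (out : String) : Decidable (Spec_parse_vtt_to_custom_format vtt_content out) := by unfold Spec_parse_vtt_to_custom_format; infer_instance

-- ===== CLAIM (what is proved, stated in full; the proofs are below) =====
def Claim_equal_parse_vtt_to_custom_format : Prop := ∀ (vtt_content : String), Dom_parse_vtt_to_custom_format vtt_content → Spec_parse_vtt_to_custom_format vtt_content (parse_vtt_to_custom_format vtt_content)

-- ===== LEMMAS AND PROOFS =====

-- marker / keep predicates (on an already-stripped line)
def pvMk (l : String) : Bool := PySem.Str.isIn "-->" l
def pvKp (l : String) : Bool := decide (l ≠ "") && !PySem.Str.strIsdigit l && !PySem.Str.isIn "WEBVTT" l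

-- positions (from s) of marker lines
def pvMarks : List String → Int → List Int
  | [], _ => []
  | l :: ls, s => if pvMk l then s :: pvMarks ls (s + 1) else pvMarks ls (s + 1)

-- recursive block splitter: segments of ls between marker lines
def pvBlocks : List String → List (List String)
  | [] => [[]]
  | l :: ls => if pvMk l then [] :: pvBlocks ls else
      match pvBlocks ls with
      | [] => [[l]]
      | b :: bs => (l :: b) :: bs

-- A's second loop as a recursion: t = pending kept lines, result = list of cues
def pvG : List String → List String → List String
  | t, [] => if t = [] then [] else [PySem.Str.join "\n" t]
  | t, l :: ls =>
      let s := PySem.Str.strip l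
      if pvMk s then (if t = [] then pvG [] ls else PySem.Str.join "\n" t :: pvG [] ls)
      else if pvKp s then pvG (t ++ [s]) ls else pvG t ls

def pvIdx (L : List String) : List Int := [-1] ++ pvMarks L 0 ++ [(L.length : Int)]

def pvBlocksB (L : List String) : List (List String) :=
  ((pvIdx L).zip (pvIdx L).tail).map (fun p => PySem.List.slice L (some (p.1 + 1)) (some p.2))

def pvCues (Y : List (List String)) : List String :=
  (Y.filter (· ≠ [])).map (PySem.Str.join "\n")

def pvConsHead' (t : List String) : List (List String) → List (List String)
  | [] => [t]
  | b :: bs => (t ++ b) :: bs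

lemma pvConsHead'_nil (Y : List (List String)) (h : Y ≠ []) : pvConsHead' [] Y = Y := by
  cases Y with
  | nil => exact absurd rfl h
  | cons b bs => simp [pvConsHead']

lemma pvMarks_enum (ls : List String) (s : Int) :
    ((PySem.List.enumerate ls s).filter (fun p => pvMk p.2)).map (·.1) = pvMarks ls s := by
  induction ls generalizing s with
  | nil => simp [pvMarks]
  | cons l ls ih =>
    simp only [PySem.List.enumerate_cons, List.filter_cons, pvMarks]
    by_cases h : pvMk l = true <;> simp [h, ih]

lemma pvMarks_shift (ls : List String) (s : Int) :
    pvMarks ls (s + 1) = (pvMarks ls s).map (· + 1) := by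
  induction ls generalizing s with
  | nil => simp [pvMarks]
  | cons l ls ih =>
    simp only [pvMarks]
    by_cases h : pvMk l = true <;> simp [h, ih]

lemma pvMarks_le {ls : List String} {s x : Int} (h : x ∈ pvMarks ls s) : s ≤ x := by
  induction ls generalizing s with
  | nil => simp [pvMarks] at h
  | cons l ls ih =>
    simp only [pvMarks] at h
    by_cases hm : pvMk l = true
    · simp [hm] at h
      rcases h with h | h
      · omega
      · have := ih h; omega
    · simp [hm] at h
      have := ih h; omega

lemma pvBlocks_ne_nil (ls : List String) : pvBlocks ls ≠ [] := by
  cases ls with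
  | nil => simp [pvBlocks]
  | cons l ls =>
    simp only [pvBlocks]
    by_cases h : pvMk l = true
    · simp [h]
    · simp only [h]
      cases hb : pvBlocks ls <;> simp

lemma pv_slice_shift (a b : Int) (l : String) (ls : List String) (ha : -1 ≤ a) (hb : 0 ≤ b) :
    PySem.List.slice (l :: ls) (some (a + 1 + 1)) (some (b + 1))
      = PySem.List.slice ls (some (a + 1)) (some b) := by
  obtain ⟨n, hn⟩ : ∃ n : Nat, a + 1 = (n : Int) := ⟨(a + 1).toNat, by omega⟩
  obtain ⟨m, hm⟩ : ∃ m : Nat, b = (m : Int) := ⟨b.toNat, by omega⟩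
  have h1 : a + 1 + 1 = ((n + 1 : Nat) : Int) := by omega
  have h2 : b + 1 = ((m + 1 : Nat) : Int) := by omega
  rw [h1, h2, hn, hm, PySem.List.slice_natCast, PySem.List.slice_natCast]
  simp [List.drop_succ_cons, Nat.succ_sub_succ]

lemma pv_slice_zero_succ (r : Int) (l : String) (ls : List String) (hr : 0 ≤ r) :
    PySem.List.slice (l :: ls) none (some (r + 1))
      = l :: PySem.List.slice ls none (some r) := by
  obtain ⟨m, hm⟩ : ∃ m : Nat, r = (m : Int) := ⟨r.toNat, by omega⟩
  have h2 : r + 1 = ((m + 1 : Nat) : Int) := by omega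
  rw [h2, hm, PySem.List.slice_to_natCast, PySem.List.slice_to_natCast]
  simp

lemma pv_zip_tail_map {α β : Type} (f : α → β) (xs : List α) :
    (xs.map f).zip ((xs.map f).tail) = (xs.zip xs.tail).map (Prod.map f f) := by
  cases xs with
  | nil => simp
  | cons a xs =>
    show (List.map f (a :: xs)).zip (List.map f xs) = _
    rw [List.zip_map]
    rfl

lemma pvIdx_tail (L : List String) : (pvIdx L).tail = pvMarks L 0 ++ [(L.length : Int)] := by
  simp [pvIdx]

lemma pvIdx_cons (L : List String) : pvIdx L = -1 :: (pvMarks L 0 ++ [(L.length : Int)]) := by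
  simp [pvIdx]

lemma pvIdx_mem (L : List String) : ∀ x ∈ pvIdx L, -1 ≤ x := by
  intro x hx
  simp [pvIdx] at hx
  rcases hx with h | h | h
  · omega
  · have := pvMarks_le h; omega
  · omega

lemma pvIdx_tail_mem (L : List String) : ∀ x ∈ (pvIdx L).tail, 0 ≤ x := by
  intro x hx
  rw [pvIdx_tail] at hx
  rcases List.mem_append.mp hx with h | h
  · exact pvMarks_le h
  · simp at h; omega

lemma pv_slice_00 (xs : List String) : PySem.List.slice xs none (some 0) = [] := by
  have := PySem.List.slice_to_natCast xs 0
  simpa using this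

lemma pvBlocksB_eq (L : List String) : pvBlocksB L = pvBlocks L := by
  induction L with
  | nil =>
    simp [pvBlocksB, pvIdx, pvMarks, pvBlocks, pv_slice_00]
  | cons l ls ih =>
    by_cases hm : pvMk l = true
    · -- marker line: a fresh empty block starts
      have hsh : pvMarks ls 1 = (pvMarks ls 0).map (· + 1) := by
        simpa using pvMarks_shift ls 0
      have hidx : pvIdx (l :: ls) = -1 :: (pvIdx ls).map (· + 1) := by
        rw [pvIdx_cons, pvIdx_cons]
        simp only [List.map_cons, List.map_append, List.length_cons]
        rw [show pvMarks (l :: ls) 0 = 0 :: pvMarks ls 1 by norm_num [pvMarks, hm], hsh]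
        push_cast
        norm_num
      have hrest : pvIdx ls = -1 :: (pvMarks ls 0 ++ [(ls.length : Int)]) := pvIdx_cons ls
      have hpairs : (pvIdx (l :: ls)).zip ((pvIdx (l :: ls)).tail)
          = (-1, 0) :: ((pvIdx ls).zip ((pvIdx ls).tail)).map (Prod.map (· + 1) (· + 1)) := by
        rw [hidx, ← pv_zip_tail_map]
        rw [hrest]
        norm_num
      show ((pvIdx (l :: ls)).zip ((pvIdx (l :: ls)).tail)).map
          (fun p => PySem.List.slice (l :: ls) (some (p.1 + 1)) (some p.2)) = pvBlocks (l :: ls)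
      rw [hpairs]
      simp only [List.map_cons, List.map_map]
      have h1 : PySem.List.slice (l :: ls) (some ((-1 : Int) + 1)) (some 0) = [] := by
        norm_num [pv_slice_00]

      rw [h1]
      have h2 : ∀ p ∈ (pvIdx ls).zip ((pvIdx ls).tail),
          (fun p => PySem.List.slice (l :: ls) (some (p.1 + 1)) (some p.2)).comp
            (Prod.map (· + 1) (· + 1)) p
          = PySem.List.slice ls (some (p.1 + 1)) (some p.2) := by
        intro p hp
        obtain ⟨hp1, hp2⟩ := List.of_mem_zip (show (p.1, p.2) ∈ _ from hp)
        exact pv_slice_shift p.1 p.2 l ls (pvIdx_mem ls p.1 hp1) (pvIdx_tail_mem ls p.2 hp2)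
      rw [List.map_congr_left h2]
      have : pvBlocks (l :: ls) = [] :: pvBlocks ls := by simp [pvBlocks, hm]
      rw [this, ← ih]
      rfl
    · -- ordinary line: it is prepended to the first block
      obtain ⟨r, R', hRc⟩ : ∃ r R', pvMarks ls 0 ++ [(ls.length : Int)] = r :: R' := by
        cases h : pvMarks ls 0 ++ [(ls.length : Int)] with
        | nil => simp at h
        | cons r R' => exact ⟨r, R', rfl⟩
      have hr0 : 0 ≤ r := by
        have : r ∈ (pvIdx ls).tail := by rw [pvIdx_tail, hRc]; exact List.mem_cons_self
        exact pvIdx_tail_mem ls r this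
      have hsh : pvMarks ls 1 = (pvMarks ls 0).map (· + 1) := by
        simpa using pvMarks_shift ls 0
      have hidx : pvIdx (l :: ls) = -1 :: (r :: R').map (· + 1) := by
        rw [pvIdx_cons, ← hRc]
        simp only [List.map_cons, List.map_append, List.length_cons]
        rw [show pvMarks (l :: ls) 0 = pvMarks ls 1 by norm_num [pvMarks, hm], hsh]
        push_cast
        norm_num
      have hidxls : pvIdx ls = -1 :: (r :: R') := by rw [pvIdx_cons, hRc]
      have hpairs : (pvIdx (l :: ls)).zip ((pvIdx (l :: ls)).tail)
          = (-1, r + 1) :: ((r :: R').zip R').map (Prod.map (· + 1) (· + 1)) := by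
        rw [hidx]
        simp only [List.map_cons, List.tail_cons, List.zip_cons_cons]
        congr 1
        have := pv_zip_tail_map (· + (1 : Int)) (r :: R')
        simpa using this
      have hpairsls : (pvIdx ls).zip ((pvIdx ls).tail) = (-1, r) :: (r :: R').zip R' := by
        rw [hidxls]; rfl
      show ((pvIdx (l :: ls)).zip ((pvIdx (l :: ls)).tail)).map
          (fun p => PySem.List.slice (l :: ls) (some (p.1 + 1)) (some p.2)) = pvBlocks (l :: ls)
      rw [hpairs]
      simp only [List.map_cons, List.map_map]
      have h1 : PySem.List.slice (l :: ls) (some ((-1 : Int) + 1)) (some (r + 1))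
          = l :: PySem.List.slice ls none (some r) := by
        norm_num [pv_slice_zero_succ r l ls hr0]
      rw [h1]
      have hmemR : ∀ x ∈ r :: R', 0 ≤ x := by
        intro x hx
        have : x ∈ (pvIdx ls).tail := by rw [pvIdx_tail, hRc]; exact hx
        exact pvIdx_tail_mem ls x this
      have h2 : ∀ p ∈ (r :: R').zip R',
          (fun p => PySem.List.slice (l :: ls) (some (p.1 + 1)) (some p.2)).comp
            (Prod.map (· + 1) (· + 1)) p
          = PySem.List.slice ls (some (p.1 + 1)) (some p.2) := by
        intro p hp
        obtain ⟨hp1, hp2⟩ := List.of_mem_zip (show (p.1, p.2) ∈ _ from hp)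
        have hb : 0 ≤ p.2 := hmemR p.2 (List.mem_cons_of_mem r hp2)
        have ha : -1 ≤ p.1 := by have := hmemR p.1 hp1; omega
        exact pv_slice_shift p.1 p.2 l ls ha hb
      rw [List.map_congr_left h2]
      have hBls : pvBlocks ls = PySem.List.slice ls none (some r)
          :: ((r :: R').zip R').map (fun p => PySem.List.slice ls (some (p.1 + 1)) (some p.2)) := by
        rw [← ih]
        show ((pvIdx ls).zip ((pvIdx ls).tail)).map
            (fun p => PySem.List.slice ls (some (p.1 + 1)) (some p.2)) = _
        rw [hpairsls]
        norm_num
      simp [pvBlocks, hm, hBls]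

lemma pvKp_iff (l : String) : pvKp l = true
    ↔ (l ≠ "" ∧ ¬ PySem.Str.strIsdigit l = true ∧ ¬ PySem.Str.isIn "WEBVTT" l = true) := by
  simp [pvKp, and_assoc]

set_option maxHeartbeats 1000000 in
lemma pvG_fold (ls : List String) (cs t : List String) :
    (let st := ls.foldl pvStepA2 (cs, t);
     if st.2 ≠ [] then st.1 ++ [PySem.Str.join "\n" st.2] else st.1) = cs ++ pvG t ls := by
  induction ls generalizing cs t with
  | nil => by_cases h : t = [] <;> simp [pvG, h]
  | cons l ls ih =>
    have hstep : pvStepA2 (cs, t) l =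
        if pvMk (PySem.Str.strip l) then
          (if t ≠ [] then (cs ++ [PySem.Str.join "\n" t], ([] : List String)) else (cs, t))
        else if pvKp (PySem.Str.strip l) then (cs, t ++ [PySem.Str.strip l]) else (cs, t) := by
      show (if PySem.Str.isIn "-->" (PySem.Str.strip l) = true then
              (if t ≠ [] then (cs ++ [PySem.Str.join "\n" t], ([] : List String)) else (cs, t))
            else if PySem.Str.strip l ≠ "" ∧ ¬ PySem.Str.strIsdigit (PySem.Str.strip l) = true
                    ∧ ¬ PySem.Str.isIn "WEBVTT" (PySem.Str.strip l) = true then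
              (cs, t ++ [PySem.Str.strip l])
            else (cs, t)) = _
      simp only [pvMk]
      by_cases hm : PySem.Str.isIn "-->" (PySem.Str.strip l) = true
      · rw [if_pos hm, if_pos hm]
      · rw [if_neg hm, if_neg hm]
        by_cases hk : pvKp (PySem.Str.strip l) = true
        · rw [if_pos ((pvKp_iff _).mp hk), if_pos hk]
        · rw [if_neg (fun hc => hk ((pvKp_iff _).mpr hc)), if_neg hk]
    show (let st := List.foldl pvStepA2 (pvStepA2 (cs, t) l) ls;
          if st.2 ≠ [] then st.1 ++ [PySem.Str.join "\n" st.2] else st.1) = cs ++ pvG t (l :: ls)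
    rw [hstep]
    by_cases hm : pvMk (PySem.Str.strip l) = true
    · by_cases ht : t = []
      · subst ht
        have h1 : ¬(([] : List String) ≠ []) := fun h => h rfl
        rw [if_pos hm, if_neg h1, show pvG [] (l :: ls) = pvG [] ls by simp [pvG, hm]]
        exact ih cs []
      · rw [if_pos hm, if_pos ht, show pvG t (l :: ls) = PySem.Str.join "\n" t :: pvG [] ls by
          simp [pvG, hm, ht]]
        rw [ih (cs ++ [PySem.Str.join "\n" t]) []]
        simp
    · by_cases hk : pvKp (PySem.Str.strip l) = true
      · rw [if_neg hm, if_pos hk, show pvG t (l :: ls) = pvG (t ++ [PySem.Str.strip l]) ls by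
          simp [pvG, hm, hk]]
        exact ih cs (t ++ [PySem.Str.strip l])
      · rw [if_neg hm, if_neg hk, show pvG t (l :: ls) = pvG t ls by simp [pvG, hm, hk]]
        exact ih cs t

lemma pvG_bridge (ls : List String) (t : List String) :
    pvG t ls = pvCues (pvConsHead' t ((pvBlocks (ls.map PySem.Str.strip)).map (List.filter pvKp))) := by
  induction ls generalizing t with
  | nil =>
    by_cases h : t = [] <;>
      simp [pvG, pvBlocks, pvConsHead', pvCues, h]
  | cons l ls ih =>
    have hmap : (l :: ls).map PySem.Str.strip = PySem.Str.strip l :: ls.map PySem.Str.strip := rfl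
    obtain ⟨b, bs, hbs⟩ : ∃ b bs, pvBlocks (ls.map PySem.Str.strip) = b :: bs := by
      cases h : pvBlocks (ls.map PySem.Str.strip) with
      | nil => exact absurd h (pvBlocks_ne_nil _)
      | cons b bs => exact ⟨b, bs, rfl⟩
    rw [hmap]
    by_cases hm : pvMk (PySem.Str.strip l) = true
    · have hblk : pvBlocks (PySem.Str.strip l :: ls.map PySem.Str.strip)
          = [] :: pvBlocks (ls.map PySem.Str.strip) := by simp [pvBlocks, hm]
      rw [hblk, hbs]
      by_cases ht : t = []
      · rw [show pvG t (l :: ls) = pvG [] ls by simp [pvG, hm, ht], ih]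
        rw [hbs, ht]
        simp [pvConsHead', pvCues, List.filter_cons]
      · rw [show pvG t (l :: ls) = PySem.Str.join "\n" t :: pvG [] ls by simp [pvG, hm, ht], ih]
        rw [hbs]
        simp [pvConsHead', pvCues, List.filter_cons, ht]
    · rw [show pvBlocks (PySem.Str.strip l :: ls.map PySem.Str.strip)
          = (PySem.Str.strip l :: b) :: bs by simp [pvBlocks, hm, hbs]]
      by_cases hk : pvKp (PySem.Str.strip l) = true
      · rw [show pvG t (l :: ls) = pvG (t ++ [PySem.Str.strip l]) ls by simp [pvG, hm, hk], ih]
        rw [hbs]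
        simp [pvConsHead', hk]
      · rw [show pvG t (l :: ls) = pvG t ls by simp [pvG, hm, hk], ih]
        rw [hbs]
        simp [pvConsHead', hk]

lemma pv_join_ne_empty (b : List String) (h : ∀ x ∈ b, x ≠ "") :
    (decide (PySem.Str.join "\n" b ≠ "")) = (decide (b ≠ [])) := by
  cases b with
  | nil => rfl
  | cons x xs =>
    have hx : x ≠ "" := h x List.mem_cons_self
    have hne : PySem.Str.join "\n" (x :: xs) ≠ "" := by
      intro hc
      have hl : (PySem.Str.join "\n" (x :: xs)).toList = [] := by rw [hc]; rfl
      rw [PySem.Str.toList_join] at hl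
      cases xs with
      | nil =>
        rw [show List.map String.toList [x] = [x.toList] from rfl,
          PySem.Chars.join_singleton] at hl
        exact hx (String.toList_eq_nil_iff.mp hl)
      | cons y ys =>
        rw [show List.map String.toList (x :: y :: ys)
              = x.toList :: y.toList :: List.map String.toList ys from rfl,
          PySem.Chars.join_cons_cons] at hl
        simp at hl
    simp [hne]

lemma pv_chars_join_append (sep : List Char) (xs ys : List (List Char)) (hx : xs ≠ []) (hy : ys ≠ []) :
    PySem.Chars.join sep (xs ++ ys) = PySem.Chars.join sep xs ++ sep ++ PySem.Chars.join sep ys := by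
  induction xs with
  | nil => exact absurd rfl hx
  | cons x xs ih =>
    cases xs with
    | nil =>
      cases ys with
      | nil => exact absurd rfl hy
      | cons y ys =>
        rw [show ([x] ++ (y :: ys)) = x :: y :: ys from rfl, PySem.Chars.join_cons_cons,
          PySem.Chars.join_singleton]
    | cons x' xs' =>
      rw [show ((x :: x' :: xs') ++ ys) = x :: ((x' :: xs') ++ ys) from rfl]
      have hys : (x' :: xs') ++ ys = x' :: (xs' ++ ys) := rfl
      rw [hys, PySem.Chars.join_cons_cons, show x' :: (xs' ++ ys) = (x' :: xs') ++ ys from rfl,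
        ih (by simp), PySem.Chars.join_cons_cons]
      simp [List.append_assoc]

lemma pv_chars_join_map_join (sep : List Char) (pss : List (List (List Char))) (h : ∀ p ∈ pss, p ≠ []) :
    PySem.Chars.join sep (pss.map (PySem.Chars.join sep)) = PySem.Chars.join sep pss.flatten := by
  induction pss with
  | nil => rfl
  | cons p pss ih =>
    cases pss with
    | nil => simp [PySem.Chars.join_singleton]
    | cons q pss' =>
      have hp : p ≠ [] := h p List.mem_cons_self
      have hq : q ≠ [] := h q (List.mem_cons_of_mem p List.mem_cons_self)
      have hflat : (q :: pss').flatten ≠ [] := by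
        simp only [List.flatten_cons]
        intro hc
        exact hq (List.append_eq_nil_iff.mp hc).1
      rw [show List.map (PySem.Chars.join sep) (p :: q :: pss')
            = PySem.Chars.join sep p :: PySem.Chars.join sep q :: List.map (PySem.Chars.join sep) pss' from rfl,
        PySem.Chars.join_cons_cons,
        show PySem.Chars.join sep q :: List.map (PySem.Chars.join sep) pss'
            = List.map (PySem.Chars.join sep) (q :: pss') from rfl,
        ih (fun x hx => h x (List.mem_cons_of_mem p hx)),
        show (p :: q :: pss').flatten = p ++ (q :: pss').flatten from rfl,
        pv_chars_join_append sep p ((q :: pss').flatten) hp hflat]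

lemma pv_format_eq (es : List (Int × String)) :
    PySem.Str.join "\n" (es.map (fun p => PySem.Str.join "\n" [PySem.Int.toStr p.1, p.2, ""]))
      = PySem.Str.join "\n" (es.foldl (fun acc p => acc ++ [PySem.Int.toStr p.1, p.2, ""]) []) := by
  rw [PySem.List.foldl_append_eq_flatMap (fun p => [PySem.Int.toStr p.1, p.2, ""]) es []]
  rw [List.nil_append]
  show String.ofList _ = String.ofList _
  congr 1
  rw [List.map_flatMap, List.map_map]
  have h1 : (List.map (String.toList ∘ fun p : Int × String =>
        PySem.Str.join "\n" [PySem.Int.toStr p.1, p.2, ""]) es)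
      = List.map (PySem.Chars.join "\n".toList)
          (List.map (fun p : Int × String =>
            [(PySem.Int.toStr p.1).toList, p.2.toList, []]) es) := by
    rw [List.map_map]
    refine List.map_congr_left fun p _ => ?_
    simp only [Function.comp_apply, PySem.Str.toList_join]
    rfl
  have h2 : (List.flatMap (fun p : Int × String =>
        List.map String.toList [PySem.Int.toStr p.1, p.2, ""]) es)
      = (List.map (fun p : Int × String =>
            [(PySem.Int.toStr p.1).toList, p.2.toList, []]) es).flatten := by
    rw [List.flatMap_def]
    congr 1
  rw [h1, h2]
  exact pv_chars_join_map_join "\n".toList _ (by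
    intro p hp
    simp only [List.mem_map] at hp
    obtain ⟨q, _, rfl⟩ := hp
    simp)

lemma pv_cues_eq (L : List String) :
    ((pvBlocksB L).map (fun blk => PySem.Str.join "\n" (blk.filter pvKp))).filter
        (fun c => decide (c ≠ ""))
      = pvCues ((pvBlocks L).map (List.filter pvKp)) := by
  rw [pvBlocksB_eq]
  have h1 : ((pvBlocks L).map (fun blk => PySem.Str.join "\n" (blk.filter pvKp)))
      = ((pvBlocks L).map (List.filter pvKp)).map (PySem.Str.join "\n") := by
    rw [List.map_map]; rfl
  show (((pvBlocks L).map (fun blk => PySem.Str.join "\n" (blk.filter pvKp))).filter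
      (fun c => decide (c ≠ ""))) = _
  rw [h1, List.filter_map]
  unfold pvCues
  congr 1
  refine List.filter_congr fun x hx => ?_
  simp only [List.mem_map] at hx
  obtain ⟨b, _, rfl⟩ := hx
  rw [Function.comp_apply]
  exact pv_join_ne_empty _ (by
    intro y hy
    have := List.of_mem_filter hy
    simp [pvKp] at this
    exact this.1.1)

-- ===== VERDICT (by name: the statement is the Claim_ definition above) =====
set_option maxHeartbeats 4000000 in
theorem parse_vtt_to_custom_format_spec : Claim_equal_parse_vtt_to_custom_format := by
  intro vtt _
  show parse_vtt_to_custom_format vtt = parse_vtt_to_custom_format_alt vtt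
  simp only [parse_vtt_to_custom_format, parse_vtt_to_custom_format_alt]
  set L0 := (PySem.Str.split? (PySem.Str.strip vtt) "\n").getD [] with hL0
  set lines := L0.map PySem.Str.strip with hlines
  have hm' : ((PySem.List.enumerate lines).filter (fun p => PySem.Str.isIn "-->" p.2)).map (·.1)
      = pvMarks lines 0 := by
    have := pvMarks_enum lines 0
    simpa [pvMk] using this
  rw [hm']
  have hblocks : (([-1] ++ pvMarks lines 0 ++ [(lines.length : Int)]).zip
      (([-1] ++ pvMarks lines 0 ++ [(lines.length : Int)]).tail)).map
      (fun p : Int × Int => PySem.List.slice lines (some (p.1 + 1)) (some p.2))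
      = pvBlocksB lines := rfl
  rw [hblocks]
  have hkp : (fun l => decide (l ≠ "") && !PySem.Str.strIsdigit l && !PySem.Str.isIn "WEBVTT" l)
      = pvKp := rfl
  rw [hkp, pv_cues_eq lines]
  have hA : (if (L0.foldl pvStepA2 ([], [])).2 ≠ []
      then (L0.foldl pvStepA2 ([], [])).1 ++ [PySem.Str.join "\n" (L0.foldl pvStepA2 ([], [])).2]
      else (L0.foldl pvStepA2 ([], [])).1) = pvG [] L0 := by
    simpa using pvG_fold L0 [] []
  rw [hA]
  have hYne : (pvBlocks lines).map (List.filter pvKp) ≠ [] := by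
    intro h
    exact pvBlocks_ne_nil lines (List.map_eq_nil_iff.mp h)
  have hB : pvG [] L0 = pvCues ((pvBlocks lines).map (List.filter pvKp)) := by
    rw [pvG_bridge L0 [], pvConsHead'_nil _ hYne]
  rw [hB]
  exact (pv_format_eq (PySem.List.enumerate (pvCues ((pvBlocks lines).map (List.filter pvKp))))).symm
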